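-- pv_equiv track=rewrite | github.com/queelius/jsl | jsl/sexp.py | format_sexp
-- ===== SOURCE A (Python) =====
-- def format_sexp(sexp: str, indent: int = 2) -> str:
--     """
--     Pretty-print S-expression with indentation.
--
--     Args:
--         sexp: S-expression string
--         indent: Spaces per indent level
--
--     Returns:
--         Formatted S-expression
--     """
--     # This is a simple formatter - could be enhanced
--     level = 0
--     result = []
--     i = 0
--
--     while i < len(sexp):
--         char = sexp[i]
--
--         if char == '(':
--             if i > 0 and sexp[i-1] not in ' \n(':
--                 result.append(' ')
--             result.append('(')
--             level += 1
--
--         elif char == ')':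
--             level -= 1
--             result.append(')')
--
--         else:
--             result.append(char)
--
--         i += 1
--
--     return ''.join(result)
-- ===== SOURCE B (Python) =====
-- def format_sexp(sexp: str, indent: int = 2) -> str:
--     """Split the string on '(' and rejoin the segments, prefixing each '(' with
--     a space when the preceding segment ends in a character other than space or
--     newline; an empty preceding segment contributes no space."""
--     head, *parts = sexp.split('(')
--     pieces = [head]
--     prev = head
--     for part in parts:
--         pieces.append(' (' if prev and prev[-1] not in ' \n' else '(')
--         pieces.append(part)
--         prev = part
--     return ''.join(pieces)
-- ===== Notes on version B (the rewrite author's own statement) =====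
-- stated objective: simpler
-- what changed: Replaces the character-by-character index loop (with its dead level counter) by a staged split-on-'(' pass followed by a rejoin of the segments, deciding the space from the last character of the preceding segment.
import Mathlib
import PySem

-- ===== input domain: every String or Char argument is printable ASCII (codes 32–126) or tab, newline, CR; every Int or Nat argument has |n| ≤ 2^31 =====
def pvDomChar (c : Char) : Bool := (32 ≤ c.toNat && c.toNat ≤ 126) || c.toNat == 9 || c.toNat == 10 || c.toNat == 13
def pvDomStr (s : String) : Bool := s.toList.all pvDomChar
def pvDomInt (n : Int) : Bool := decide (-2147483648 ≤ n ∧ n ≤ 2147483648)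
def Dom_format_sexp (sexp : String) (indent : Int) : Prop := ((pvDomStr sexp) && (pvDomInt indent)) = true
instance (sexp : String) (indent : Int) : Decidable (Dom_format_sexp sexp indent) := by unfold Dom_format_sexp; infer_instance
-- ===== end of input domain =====

-- B replaces A's character-by-character index loop (with its dead `level` counter) by a
-- staged split-on-'(' pass followed by a rejoin of the segments; same return value everywhere.

-- ===== PORT A =====
-- A's while loop over i, carrying the previous character (sexp[i-1]; none ⟺ i = 0)
-- and the (dead) level counter, appending to the result accumulator.
def formatALoop (prev : Option Char) (level : Int) : List Char → List Char
  | [] => []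
  | c :: rest =>
    if c = '(' then
      (match prev with
       | some p => if p ≠ ' ' ∧ p ≠ '\n' ∧ p ≠ '(' then [' ', '('] else ['(']
       | none => ['(']) ++ formatALoop (some c) (level + 1) rest
    else if c = ')' then
      ')' :: formatALoop (some c) (level - 1) rest
    else
      c :: formatALoop (some c) level rest

def format_sexp (sexp : String) (indent : Int) : String :=
  String.mk (formatALoop none 0 sexp.toList)

-- ===== PORT B =====
-- Source B's sexp.split('('): split the character list at every '(' (hand-rolled, step for step:
-- n occurrences of '(' yield n+1 segments, separators dropped).
def splitPar : List Char → List (List Char)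
  | [] => [[]]
  | c :: rest =>
    let ps := splitPar rest
    if c = '(' then [] :: ps
    else
      match ps with
      | [] => [[c]]            -- unreachable: splitPar never returns []
      | h :: t => (c :: h) :: t

-- Source B's for-loop over the remaining segments: ' (' if prev and prev[-1] not in ' \n' else '('.
def bLoop : List Char → List (List Char) → List Char
  | _, [] => []
  | prev, part :: rest =>
    (match prev.getLast? with
     | some p => if p ≠ ' ' ∧ p ≠ '\n' then [' ', '('] else ['(']
     | none => ['(']) ++ part ++ bLoop part rest

def format_sexp_alt (sexp : String) (indent : Int) : String :=
  match splitPar sexp.toList with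
  | [] => String.mk []         -- unreachable
  | head :: parts => String.mk (head ++ bLoop head parts)

-- ===== PRECONDITION & SPEC =====
def Spec_format_sexp (sexp : String) (indent : Int) (out : String) : Prop := out = format_sexp_alt sexp indent
instance (sexp : String) (indent : Int) (out : String) : Decidable (Spec_format_sexp sexp indent out) := by unfold Spec_format_sexp; infer_instance

-- ===== CLAIM (what is proved, stated in full; the proofs are below) =====
def Claim_equal_format_sexp : Prop := ∀ (sexp : String) (indent : Int), Dom_format_sexp sexp indent → Spec_format_sexp sexp indent (format_sexp sexp indent)

-- ===== LEMMAS AND PROOFS =====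

-- Proof-side context: the list standing for "the character preceding the current segment"
-- when the segment itself is empty ('(' or start-of-string contribute no space).
def ctxOf : Option Char → List Char → List Char
  | prev, [] =>
    (match prev with
     | some p => if p = '(' then [] else [p]
     | none => [])
  | _, h => h

theorem splitPar_ne_nil (cs : List Char) : splitPar cs ≠ [] := by
  cases cs with
  | nil => simp [splitPar]
  | cons c rest =>
    simp only [splitPar]
    split_ifs
    · simp
    · cases splitPar rest <;> simp

-- bLoop only looks at the last character of its first argument.
theorem bLoop_congr {a b : List Char} (h : a.getLast? = b.getLast?) (l : List (List Char)) :
    bLoop a l = bLoop b l := by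
  cases l with
  | nil => rfl
  | cons part rest => simp [bLoop, h]

theorem ctxOf_paren (h : List Char) : ctxOf (some '(') h = h := by
  cases h <;> simp [ctxOf]

-- Main invariant: A's loop equals the split-then-rejoin view, independently of `level`.
theorem loop_split (cs : List Char) : ∀ (prev : Option Char) (level : Int),
    formatALoop prev level cs =
      (match splitPar cs with
       | [] => []
       | h :: parts => h ++ bLoop (ctxOf prev h) parts) := by
  induction cs with
  | nil => intro prev level; simp [formatALoop, splitPar, bLoop]
  | cons c rest ih =>
    intro prev level
    obtain ⟨h', parts', hsp⟩ : ∃ h' parts', splitPar rest = h' :: parts' := by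
      cases hx : splitPar rest with
      | nil => exact absurd hx (splitPar_ne_nil rest)
      | cons a b => exact ⟨a, b, rfl⟩
    by_cases hc : c = '('
    · subst hc
      have hB : bLoop (ctxOf (some '(') h') parts' = bLoop h' parts' := by
        rw [ctxOf_paren]
      simp only [formatALoop, ih, hsp, splitPar, hB]
      -- remaining: A's space prefix = bLoop's space prefix at context ctxOf prev []
      cases prev with
      | none => simp [bLoop, ctxOf]
      | some p =>
        by_cases hp1 : p = '('
        · subst hp1; simp [bLoop, ctxOf]
        · by_cases hp2 : p = ' '
          · subst hp2; simp [bLoop, ctxOf]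
          · by_cases hp3 : p = '\n'
            · subst hp3; simp [bLoop, ctxOf]
            · simp [bLoop, ctxOf, hp1, hp2, hp3]
    · have hB : bLoop (ctxOf (some c) h') parts' = bLoop (c :: h') parts' := by
        cases h' with
        | nil => simp [ctxOf, hc]
        | cons x xs =>
          exact bLoop_congr (by simp [ctxOf]) _
      by_cases hc2 : c = ')'
      · subst hc2
        simp only [formatALoop, if_neg hc, ih, hsp, splitPar, hB]
        simp [ctxOf]
      · simp only [formatALoop, if_neg hc, if_neg hc2, ih, hsp, splitPar, hB]
        simp [ctxOf]

-- ===== VERDICT (by name: the statement is the Claim_ definition above) =====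
theorem format_sexp_spec : Claim_equal_format_sexp := by
  intro sexp indent _
  unfold Spec_format_sexp format_sexp format_sexp_alt
  rw [loop_split]
  obtain ⟨h, parts, hsp⟩ : ∃ h parts, splitPar sexp.toList = h :: parts := by
    cases hx : splitPar sexp.toList with
    | nil => exact absurd hx (splitPar_ne_nil _)
    | cons a b => exact ⟨a, b, rfl⟩
  rw [hsp]
  have : bLoop (ctxOf none h) parts = bLoop h parts := by
    cases h <;> simp [ctxOf]
  · simp [this]
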